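-- pv_equiv track=rewrite | github.com/colinjansen/advent_of_code | 2024/python/day22.py | calculate_diffs
-- ===== SOURCE A (Python) =====
-- from collections import defaultdict
--
-- def calculate_diffs(n, a=2000):
--     def run(n):
--         n ^= n << 6        # multiply by 64
--         n %= 16777216
--         n ^= n >> 5        # divide by 32
--         n %= 16777216
--         n ^= n << 11       # multiply by 2048
--         n %= 16777216
--         return n
--
--     diffs = [0] * a
--     sequences = defaultdict(int)
--     for i in range(a):
--         last_price = n % 10
--         n = run(n)
--         price = n % 10
--         diffs[i] = price - last_price
--         if i >= 3:
--             seq = tuple(diffs[i-3:i+1])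
--             # since the monkey will sell at the 'first' occurence of a sequence
--             # only add the sequence to the dictionary if it has not been added before
--             if seq not in sequences:
--                 sequences[seq] = price
--     return sequences, n
-- ===== SOURCE B (Python) =====
-- from collections import defaultdict
--
-- def calculate_diffs(n, a=2000):
--     def run(x):
--         x = (x ^ (x << 6)) % 16777216
--         x = (x ^ (x >> 5)) % 16777216
--         x = (x ^ (x << 11)) % 16777216
--         return x
--
--     # Direct-addressed table over a rolling base-19 code of the last four
--     # price diffs (each diff is in [-9, 9], so a 4-window is one code in
--     # [0, 19**4)); no diffs list, no slicing, no hashing during the scan.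
--     seen = bytearray(130321)          # 19**4 flags
--     found = []                        # first occurrences, in order
--     code = 0                          # rolling code of the most recent diffs
--     prev = n % 10
--     for i in range(a):
--         n = run(n)
--         price = n % 10
--         code = (code * 19 + (price - prev + 9)) % 130321
--         if i >= 3 and not seen[code]:
--             seen[code] = 1
--             # decode the 4-diff window back out of the code
--             w = (code // 6859 % 19 - 9, code // 361 % 19 - 9,
--                  code // 19 % 19 - 9, code % 19 - 9)
--             found.append((w, price))
--         prev = price
--     sequences = defaultdict(int)
--     for w, p in found:
--         sequences[w] = p
--     return sequences, n
-- ===== Notes on version B (the rewrite author's own statement) =====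
-- stated objective: alternative
-- what changed: A keeps a growing diffs array, slices a 4-tuple out of it each step and tests membership in a hash dict; B keeps no diffs list at all: it maintains a rolling base-19 code of the last four diffs, uses a direct-addressed 19^4 flag table for first-occurrence detection, decodes each new window arithmetically from its code, and only builds the defaultdict at the end from the collected first occurrences.
import Mathlib
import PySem

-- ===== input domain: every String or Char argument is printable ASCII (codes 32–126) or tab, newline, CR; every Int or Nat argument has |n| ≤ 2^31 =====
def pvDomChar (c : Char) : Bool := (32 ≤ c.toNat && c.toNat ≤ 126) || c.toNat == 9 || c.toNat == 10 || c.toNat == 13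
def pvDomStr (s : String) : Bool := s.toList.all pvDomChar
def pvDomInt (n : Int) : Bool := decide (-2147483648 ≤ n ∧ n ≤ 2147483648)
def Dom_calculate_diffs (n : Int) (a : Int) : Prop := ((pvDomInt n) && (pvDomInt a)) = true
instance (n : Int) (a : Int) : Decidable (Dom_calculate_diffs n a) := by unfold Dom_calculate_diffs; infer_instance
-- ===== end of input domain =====

-- B drops A's diffs array, slicing and in-loop dict: it maintains a rolling base-19 code of the
-- last four diffs, detects first occurrences in a direct-addressed 19^4 flag table, decodes each
-- fresh window arithmetically from its code, and builds the dict only at the end.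

-- ===== PORT A =====
-- run(n): Python '<<'/'>>' are Lean's '<<<'/'>>>' on Int (exact, also on negatives); '^' is PySem.Int.bxor; '%' is PySem.Int.mod.
def pvRun (n : Int) : Int :=
  let n1 := PySem.Int.mod (PySem.Int.bxor n (n <<< (6 : Nat))) 16777216
  let n2 := PySem.Int.mod (PySem.Int.bxor n1 (n1 >>> (5 : Nat))) 16777216
  PySem.Int.mod (PySem.Int.bxor n2 (n2 <<< (11 : Nat))) 16777216

-- 'diffs[i] = v' is List.set i.toNat (i ∈ range(a) is nonnegative and in range, so exact).
def calculate_diffs (n : Int) (a : Int) : (List (List Int × Int)) × Int :=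
  let diffs : List Int := List.replicate a.toNat 0
  let st := (PySem.List.pyRange 0 a 1).foldl
    (fun (st : List Int × PySem.Dict (List Int) Int × Int) i =>
      let diffs := st.1
      let sequences := st.2.1
      let n := st.2.2
      let last_price := PySem.Int.mod n 10
      let n := pvRun n
      let price := PySem.Int.mod n 10
      let diffs := diffs.set i.toNat (price - last_price)
      let sequences :=
        if 3 ≤ i then
          let seq := PySem.List.slice diffs (some (i - 3)) (some (i + 1))
          if sequences.contains seq then sequences else sequences.insert seq price
        else sequences
      (diffs, sequences, n))
    (diffs, PySem.Dict.empty, n)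
  (st.2.1.items, st.2.2)

-- ===== PORT B =====
-- The rolling code is always a value of 'mod _ 130321', i.e. in [0, 130321) = [0, len(seen)),
-- so Python's 'seen[code]' / 'seen[code] = 1' are exactly List.getD code.toNat / List.set code.toNat.
def calculate_diffs_alt (n : Int) (a : Int) : (List (List Int × Int)) × Int :=
  let st := (PySem.List.pyRange 0 a 1).foldl
    (fun (st : List Bool × List (List Int × Int) × Int × Int × Int) i =>
      let seen := st.1
      let found := st.2.1
      let code := st.2.2.1
      let prev := st.2.2.2.1
      let n := st.2.2.2.2
      let n := pvRun n
      let price := PySem.Int.mod n 10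
      let code := PySem.Int.mod (code * 19 + (price - prev + 9)) 130321
      let sf :=
        if 3 ≤ i ∧ seen.getD code.toNat false = false then
          let w := [PySem.Int.mod (PySem.Int.floordiv code 6859) 19 - 9,
                    PySem.Int.mod (PySem.Int.floordiv code 361) 19 - 9,
                    PySem.Int.mod (PySem.Int.floordiv code 19) 19 - 9,
                    PySem.Int.mod code 19 - 9]
          (seen.set code.toNat true, found ++ [(w, price)])
        else (seen, found)
      (sf.1, sf.2, code, price, n))
    (List.replicate 130321 false, [], 0, PySem.Int.mod n 10, n)
  let sequences := st.2.1.foldl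
    (fun (d : PySem.Dict (List Int) Int) wp => d.insert wp.1 wp.2) PySem.Dict.empty
  (sequences.items, st.2.2.2.2)

-- ===== PRECONDITION & SPEC =====
def Spec_calculate_diffs (n : Int) (a : Int) (out : (List (List Int × Int)) × Int) : Prop := out = calculate_diffs_alt n a
instance (n : Int) (a : Int) (out : (List (List Int × Int)) × Int) : Decidable (Spec_calculate_diffs n a out) := by unfold Spec_calculate_diffs; infer_instance

-- ===== CLAIM (what is proved, stated in full; the proofs are below) =====
def Claim_equal_calculate_diffs : Prop := ∀ (n : Int) (a : Int), Dom_calculate_diffs n a → Spec_calculate_diffs n a (calculate_diffs n a)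

-- ===== LEMMAS AND PROOFS =====

def pvIter (k : Nat) (n : Int) : Int :=
  match k with
  | 0 => n
  | k + 1 => pvRun (pvIter k n)

def pvPrice (n0 : Int) (i : Nat) : Int := PySem.Int.mod (pvIter i n0) 10
def pvDd (n0 : Int) (i : Nat) : Int := pvPrice n0 (i + 1) - pvPrice n0 i
def pvD (n0 : Int) (k : Nat) : List Int := (List.range k).map (pvDd n0)
def pvWin (n0 : Int) (m : Nat) : List Int :=
  [pvDd n0 (m - 3), pvDd n0 (m - 2), pvDd n0 (m - 1), pvDd n0 m]

def pvSd (d : PySem.Dict (List Int) Int) (k : List Int) (v : Int) : PySem.Dict (List Int) Int :=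
  d.setdefault k v

def pvSeq (n0 : Int) (m : Nat) : PySem.Dict (List Int) Int :=
  match m with
  | 0 => PySem.Dict.empty
  | m + 1 => if 3 ≤ m then pvSd (pvSeq n0 m) (pvWin n0 m) (pvPrice n0 (m + 1)) else pvSeq n0 m

theorem pvA_fold (n0 : Int) (k : Nat) (m : Nat) (hm : m ≤ k) :
    ((PySem.List.pyRange 0 (m : Int) 1).foldl
      (fun (st : List Int × PySem.Dict (List Int) Int × Int) i =>
        let diffs := st.1
        let sequences := st.2.1
        let n := st.2.2
        let last_price := PySem.Int.mod n 10
        let n := pvRun n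
        let price := PySem.Int.mod n 10
        let diffs := diffs.set i.toNat (price - last_price)
        let sequences :=
          if 3 ≤ i then
            let seq := PySem.List.slice diffs (some (i - 3)) (some (i + 1))
            if sequences.contains seq then sequences else sequences.insert seq price
          else sequences
        (diffs, sequences, n))
      (List.replicate k 0, PySem.Dict.empty, n0))
    = (pvD n0 m ++ List.replicate (k - m) 0, pvSeq n0 m, pvIter m n0) := by
  induction m with
  | zero => simp [PySem.List.pyRange_one_eq_nil (by omega : (0:Int) ≤ 0), pvD, pvSeq, pvIter]
  | succ m ih =>
    have h : ((m + 1 : Nat) : Int) = (m : Int) + 1 := by push_cast; ring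
    rw [h, PySem.List.pyRange_one_succ_right (by positivity), List.foldl_append,
      ih (by omega)]
    simp only [List.foldl_cons, List.foldl_nil]
    -- now compute the single step at i = (m : Int)
    have hrep : k - m = (k - (m + 1)) + 1 := by omega
    have hlenD : (pvD n0 m).length = m := by simp [pvD]
    have hset : (pvD n0 m ++ List.replicate (k - m) 0).set ((m : Int)).toNat
        (PySem.Int.mod (pvRun (pvIter m n0)) 10 - PySem.Int.mod (pvIter m n0) 10)
        = pvD n0 (m + 1) ++ List.replicate (k - (m + 1)) 0 := by
      rw [hrep, List.replicate_succ, Int.toNat_natCast,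
        List.set_append_right _ _ (by omega), hlenD, Nat.sub_self, List.set_cons_zero]
      have : pvD n0 (m+1) = pvD n0 m ++ [pvDd n0 m] := by
        simp [pvD, List.range_succ]
      rw [this, List.append_assoc]
      rfl
    rw [Int.toNat_natCast] at hset ⊢
    rw [hset]
    by_cases h3 : (3 : Int) ≤ (m : Int)
    · have h3n : 3 ≤ m := by exact_mod_cast h3
      have hslice : PySem.List.slice (pvD n0 (m + 1) ++ List.replicate (k - (m + 1)) 0)
          (some ((m : Int) - 3)) (some ((m : Int) + 1)) = pvWin n0 m := by
        rw [PySem.List.slice_toNat _ (by omega) (by omega)]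
        have e1 : ((m : Int) - 3).toNat = m - 3 := by omega
        have e2 : ((m : Int) + 1).toNat = m + 1 := by omega
        rw [e1, e2]
        have e3 : m + 1 - (m - 3) = 4 := by omega
        have hlen : (pvD n0 (m + 1)).length = m + 1 := by simp [pvD]
        rw [e3, List.drop_append_of_le_length (by omega), List.take_append,
          List.take_of_length_le (by simp [hlen]; omega)]
        have : (List.replicate (k - (m + 1)) (0:Int)).take
            (4 - ((pvD n0 (m + 1)).drop (m - 3)).length) = [] := by
          simp [hlen]
          omega
        rw [this, List.append_nil]
        apply List.ext_getElem
        · simp [hlen, pvWin]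
          omega
        · intro i h1 h2
          simp only [pvD, List.getElem_drop, List.getElem_map, List.getElem_range]
          have hi : i < 4 := by simp [pvWin] at h2; omega
          interval_cases i
          · show _ = (pvWin n0 m)[0]
            simp [pvWin]
          · show _ = (pvWin n0 m)[1]
            simp [pvWin]
            congr 1
            omega
          · show _ = (pvWin n0 m)[2]
            simp [pvWin]
            congr 1
            omega
          · show _ = (pvWin n0 m)[3]
            simp [pvWin]
            congr 1
            omega
      rw [if_pos h3, hslice]
      have hseq : pvSeq n0 (m + 1) = pvSd (pvSeq n0 m) (pvWin n0 m) (pvPrice n0 (m + 1)) := by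
        simp [pvSeq, h3n]
      rw [hseq]
      by_cases hc : (pvSeq n0 m).contains (pvWin n0 m) = true
      · rw [if_pos hc, pvSd, PySem.Dict.setdefault_of_contains _ _ hc]
        rfl
      · rw [if_neg hc, pvSd, PySem.Dict.setdefault_of_not_contains _ _ (by simpa using hc)]
        rfl
    · have h3n : ¬ 3 ≤ m := by exact_mod_cast h3
      rw [if_neg h3]
      have hseq : pvSeq n0 (m + 1) = pvSeq n0 m := by simp [pvSeq, h3n]
      rw [hseq]
      rfl


def pvCode (n0 : Int) : Nat → Int
  | 0 => 0
  | i + 1 => PySem.Int.mod (pvCode n0 i * 19 + (pvDd n0 i + 9)) 130321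

def pvFound (n0 : Int) : Nat → List (List Int × Int)
  | 0 => []
  | m + 1 =>
      if 3 ≤ m ∧ ∀ j < m, 3 ≤ j → pvWin n0 j ≠ pvWin n0 m then
        pvFound n0 m ++ [(pvWin n0 m, pvPrice n0 (m + 1))]
      else pvFound n0 m

theorem pvPrice_bounds (n0 : Int) (i : Nat) : 0 ≤ pvPrice n0 i ∧ pvPrice n0 i < 10 := by
  unfold pvPrice
  rw [PySem.Int.mod_eq_emod_of_pos (by norm_num : (0:Int) < 10)]
  exact ⟨Int.emod_nonneg _ (by norm_num), Int.emod_lt_of_pos _ (by norm_num)⟩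

theorem pvDd_bounds (n0 : Int) (i : Nat) : -9 ≤ pvDd n0 i ∧ pvDd n0 i ≤ 9 := by
  have h1 := pvPrice_bounds n0 (i + 1)
  have h2 := pvPrice_bounds n0 i
  unfold pvDd
  omega

theorem pvCode_bounds (n0 : Int) (i : Nat) : 0 ≤ pvCode n0 i ∧ pvCode n0 i < 130321 := by
  cases i with
  | zero => simp [pvCode]
  | succ i =>
    simp only [pvCode]
    rw [PySem.Int.mod_eq_emod_of_pos (by norm_num : (0:Int) < 130321)]
    omega

theorem pvCode_formula (n0 : Int) (m : Nat) :
    pvCode n0 (m + 4) = (pvDd n0 m + 9) * 6859 + (pvDd n0 (m + 1) + 9) * 361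
      + (pvDd n0 (m + 2) + 9) * 19 + (pvDd n0 (m + 3) + 9) := by
  have hm : ∀ x : Int, PySem.Int.mod x 130321 = x % 130321 :=
    fun x => PySem.Int.mod_eq_emod_of_pos (by norm_num)
  induction m with
  | zero =>
    have h0 := pvDd_bounds n0 0
    have h1 := pvDd_bounds n0 1
    have h2 := pvDd_bounds n0 2
    have h3 := pvDd_bounds n0 3
    simp only [pvCode, hm, Nat.zero_add]
    omega
  | succ m ih =>
    have h0 := pvDd_bounds n0 m
    have h1 := pvDd_bounds n0 (m + 1)
    have h2 := pvDd_bounds n0 (m + 2)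
    have h3 := pvDd_bounds n0 (m + 3)
    have h4 := pvDd_bounds n0 (m + 4)
    have hstep : pvCode n0 (m + 1 + 4) =
        PySem.Int.mod (pvCode n0 (m + 4) * 19 + (pvDd n0 (m + 4) + 9)) 130321 := rfl
    rw [hstep, ih, hm]
    have e1 : m + 1 + 1 = m + 2 := rfl
    have e2 : m + 1 + 2 = m + 3 := rfl
    have e3 : m + 1 + 3 = m + 4 := rfl
    rw [e1, e2, e3]
    omega

theorem pvWin_add3 (n0 : Int) (m : Nat) :
    pvWin n0 (m + 3) = [pvDd n0 m, pvDd n0 (m + 1), pvDd n0 (m + 2), pvDd n0 (m + 3)] := by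
  unfold pvWin
  congr 2

theorem pvDecode (n0 : Int) (m : Nat) :
    [PySem.Int.mod (PySem.Int.floordiv (pvCode n0 (m + 4)) 6859) 19 - 9,
     PySem.Int.mod (PySem.Int.floordiv (pvCode n0 (m + 4)) 361) 19 - 9,
     PySem.Int.mod (PySem.Int.floordiv (pvCode n0 (m + 4)) 19) 19 - 9,
     PySem.Int.mod (pvCode n0 (m + 4)) 19 - 9] = pvWin n0 (m + 3) := by
  have hm19 : ∀ x : Int, PySem.Int.mod x 19 = x % 19 :=
    fun x => PySem.Int.mod_eq_emod_of_pos (by norm_num)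
  have hd1 : ∀ x : Int, PySem.Int.floordiv x 6859 = x / 6859 :=
    fun x => PySem.Int.floordiv_eq_ediv_of_pos (by norm_num)
  have hd2 : ∀ x : Int, PySem.Int.floordiv x 361 = x / 361 :=
    fun x => PySem.Int.floordiv_eq_ediv_of_pos (by norm_num)
  have hd3 : ∀ x : Int, PySem.Int.floordiv x 19 = x / 19 :=
    fun x => PySem.Int.floordiv_eq_ediv_of_pos (by norm_num)
  have h0 := pvDd_bounds n0 m
  have h1 := pvDd_bounds n0 (m + 1)
  have h2 := pvDd_bounds n0 (m + 2)
  have h3 := pvDd_bounds n0 (m + 3)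
  rw [pvCode_formula, pvWin_add3, hm19, hm19, hm19, hm19, hd1, hd2, hd3]
  simp only [List.cons.injEq, and_true]
  refine ⟨by omega, by omega, by omega, by omega⟩

theorem pvCode_inj (n0 : Int) (j m : Nat) (hj : 3 ≤ j) (hm : 3 ≤ m)
    (h : pvCode n0 (j + 1) = pvCode n0 (m + 1)) : pvWin n0 j = pvWin n0 m := by
  obtain ⟨j', rfl⟩ : ∃ j', j = j' + 3 := ⟨j - 3, by omega⟩
  obtain ⟨m', rfl⟩ : ∃ m', m = m' + 3 := ⟨m - 3, by omega⟩
  rw [← pvDecode n0 j', ← pvDecode n0 m']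
  rw [show j' + 3 + 1 = j' + 4 from rfl, show m' + 3 + 1 = m' + 4 from rfl, h]

theorem pvWin_code (n0 : Int) (j m : Nat) (hj : 3 ≤ j) (hm : 3 ≤ m)
    (h : pvWin n0 j = pvWin n0 m) : pvCode n0 (j + 1) = pvCode n0 (m + 1) := by
  obtain ⟨j', rfl⟩ : ∃ j', j = j' + 3 := ⟨j - 3, by omega⟩
  obtain ⟨m', rfl⟩ : ∃ m', m = m' + 3 := ⟨m - 3, by omega⟩
  rw [pvWin_add3, pvWin_add3] at h
  simp only [List.cons.injEq, and_true] at h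
  rw [show j' + 3 + 1 = j' + 4 from rfl, show m' + 3 + 1 = m' + 4 from rfl,
    pvCode_formula, pvCode_formula, h.1, h.2.1, h.2.2.1, h.2.2.2]

def pvSeenOk (n0 : Int) (k : Nat) (S : List Bool) : Prop :=
  S.length = 130321 ∧
    ∀ c : Nat, (S.getD c false = true ↔ ∃ j, 3 ≤ j ∧ j < k ∧ (pvCode n0 (j + 1)).toNat = c)

theorem pvB_fold (n0 : Int) (k : Nat) :
    ∃ S : List Bool,
    ((PySem.List.pyRange 0 (k : Int) 1).foldl
      (fun (st : List Bool × List (List Int × Int) × Int × Int × Int) i =>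
        let seen := st.1
        let found := st.2.1
        let code := st.2.2.1
        let prev := st.2.2.2.1
        let n := st.2.2.2.2
        let n := pvRun n
        let price := PySem.Int.mod n 10
        let code := PySem.Int.mod (code * 19 + (price - prev + 9)) 130321
        let sf :=
          if 3 ≤ i ∧ seen.getD code.toNat false = false then
            let w := [PySem.Int.mod (PySem.Int.floordiv code 6859) 19 - 9,
                      PySem.Int.mod (PySem.Int.floordiv code 361) 19 - 9,
                      PySem.Int.mod (PySem.Int.floordiv code 19) 19 - 9,
                      PySem.Int.mod code 19 - 9]
            (seen.set code.toNat true, found ++ [(w, price)])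
          else (seen, found)
        (sf.1, sf.2, code, price, n))
      (List.replicate 130321 false, [], 0, PySem.Int.mod n0 10, n0))
    = (S, pvFound n0 k, pvCode n0 k, pvPrice n0 k, pvIter k n0) ∧ pvSeenOk n0 k S := by
  induction k with
  | zero =>
    refine ⟨List.replicate 130321 false, ?_, List.length_replicate, ?_⟩
    · rw [Nat.cast_zero, PySem.List.pyRange_one_eq_nil (by omega : (0:Int) ≤ 0)]
      rfl
    · intro c
      rw [List.getD_eq_getElem?_getD, List.getElem?_replicate]
      constructor
      · intro h
        exfalso
        revert h
        split_ifs <;> simp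
      · rintro ⟨j, -, hj, -⟩
        exact absurd hj (Nat.not_lt_zero j)
  | succ k ih =>
    obtain ⟨S, hS, hlen, hchar⟩ := ih
    have hcast : ((k + 1 : Nat) : Int) = (k : Int) + 1 := by push_cast; ring
    rw [hcast, PySem.List.pyRange_one_succ_right (by positivity), List.foldl_append, hS]
    simp only [List.foldl_cons, List.foldl_nil]
    have hprice : PySem.Int.mod (pvRun (pvIter k n0)) 10 = pvPrice n0 (k + 1) := rfl
    have hn : pvRun (pvIter k n0) = pvIter (k + 1) n0 := rfl
    have hcode : PySem.Int.mod (pvCode n0 k * 19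
        + (pvPrice n0 (k + 1) - pvPrice n0 k + 9)) 130321 = pvCode n0 (k + 1) := rfl
    rw [hprice, hn, hcode]
    have hb := pvCode_bounds n0 (k + 1)
    have hidx : (pvCode n0 (k + 1)).toNat < S.length := by rw [hlen]; omega
    by_cases h3 : 3 ≤ k
    · have h3i : (3 : Int) ≤ (k : Int) := by exact_mod_cast h3
      by_cases hf : ∀ j < k, 3 ≤ j → pvWin n0 j ≠ pvWin n0 k
      · have hgd : S.getD (pvCode n0 (k + 1)).toNat false = false := by
          cases hv : S.getD (pvCode n0 (k + 1)).toNat false with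
          | false => rfl
          | true =>
            obtain ⟨j, hj1, hj2, hj3⟩ := (hchar _).mp hv
            have hb1 := pvCode_bounds n0 (j + 1)
            have heq : pvCode n0 (j + 1) = pvCode n0 (k + 1) := by omega
            exact absurd (pvCode_inj n0 j k hj1 h3 heq) (hf j hj2 hj1)
        rw [if_pos (⟨h3i, hgd⟩ : (3:Int) ≤ (k : Int) ∧ _)]
        refine ⟨S.set (pvCode n0 (k + 1)).toNat true, ?_, by rw [List.length_set]; exact hlen, ?_⟩
        · have hfound : pvFound n0 (k + 1)
              = pvFound n0 k ++ [(pvWin n0 k, pvPrice n0 (k + 1))] := by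
            rw [pvFound, if_pos ⟨h3, hf⟩]
          rw [hfound]
          obtain ⟨k', rfl⟩ : ∃ k', k = k' + 3 := ⟨k - 3, by omega⟩
          rw [show k' + 3 + 1 = k' + 4 from rfl, ← pvDecode n0 k']
        · have hset : ∀ c : Nat, (S.set (pvCode n0 (k + 1)).toNat true).getD c false
              = if (pvCode n0 (k + 1)).toNat = c then true else S.getD c false := by
            intro c
            rw [List.getD_eq_getElem?_getD, List.getElem?_set, List.getD_eq_getElem?_getD]
            split_ifs with h1
            · simp
            · rfl
          intro c
          rw [hset c]
          split_ifs with he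
          · constructor
            · intro _
              exact ⟨k, h3, Nat.lt_succ_self k, he⟩
            · intro _
              rfl
          · rw [hchar c]
            constructor
            · rintro ⟨j, hj1, hj2, hj3⟩
              exact ⟨j, hj1, by omega, hj3⟩
            · rintro ⟨j, hj1, hj2, hj3⟩
              rcases Nat.lt_succ_iff_lt_or_eq.mp hj2 with h | rfl
              · exact ⟨j, hj1, h, hj3⟩
              · exact absurd hj3 he
      · push Not at hf
        obtain ⟨j0, hj0lt, hj03, hj0eq⟩ := hf
        have hv : S.getD (pvCode n0 (k + 1)).toNat false = true :=
          (hchar _).mpr ⟨j0, hj03, hj0lt, by rw [pvWin_code n0 j0 k hj03 h3 hj0eq]⟩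
        rw [if_neg (by rintro ⟨-, hfalse⟩; rw [hv] at hfalse; cases hfalse)]
        have hfound : pvFound n0 (k + 1) = pvFound n0 k := by
          rw [pvFound, if_neg]
          rintro ⟨-, h⟩
          exact h j0 hj0lt hj03 hj0eq
        refine ⟨S, by rw [hfound], hlen, ?_⟩
        intro c
        rw [hchar c]
        constructor
        · rintro ⟨j, hj1, hj2, hj3⟩
          exact ⟨j, hj1, by omega, hj3⟩
        · rintro ⟨j, hj1, hj2, hj3⟩
          rcases Nat.lt_succ_iff_lt_or_eq.mp hj2 with h | rfl
          · exact ⟨j, hj1, h, hj3⟩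
          · refine ⟨j0, hj03, hj0lt, ?_⟩
            rw [pvWin_code n0 j0 j hj03 h3 hj0eq]
            exact hj3
    · rw [if_neg (by rintro ⟨h3i, -⟩; exact h3 (by exact_mod_cast h3i))]
      have hfound : pvFound n0 (k + 1) = pvFound n0 k := by
        rw [pvFound, if_neg]
        rintro ⟨h, -⟩
        exact h3 h
      refine ⟨S, by rw [hfound], hlen, ?_⟩
      intro c
      rw [hchar c]
      constructor
      · rintro ⟨j, hj1, hj2, hj3⟩
        exact ⟨j, hj1, by omega, hj3⟩
      · rintro ⟨j, hj1, hj2, hj3⟩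
        rcases Nat.lt_succ_iff_lt_or_eq.mp hj2 with h | rfl
        · exact ⟨j, hj1, h, hj3⟩
        · exact absurd hj1 h3

theorem pvSeq_contains (n0 : Int) (m : Nat) (w : List Int) :
    (pvSeq n0 m).contains w = true ↔ ∃ j, 3 ≤ j ∧ j < m ∧ pvWin n0 j = w := by
  induction m with
  | zero => simp [pvSeq]
  | succ m ih =>
    by_cases h3 : 3 ≤ m
    · simp only [pvSeq, if_pos h3, pvSd, PySem.Dict.contains_setdefault, Bool.or_eq_true,
        beq_iff_eq, ih]
      constructor
      · rintro (rfl | ⟨j, hj1, hj2, hj3⟩)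
        · exact ⟨m, h3, by omega, rfl⟩
        · exact ⟨j, hj1, by omega, hj3⟩
      · rintro ⟨j, hj1, hj2, hj3⟩
        rcases Nat.lt_succ_iff_lt_or_eq.mp hj2 with h | rfl
        · exact Or.inr ⟨j, hj1, h, hj3⟩
        · exact Or.inl hj3.symm
    · simp only [pvSeq, if_neg h3, ih]
      constructor
      · rintro ⟨j, hj1, hj2, hj3⟩
        exact ⟨j, hj1, by omega, hj3⟩
      · rintro ⟨j, hj1, hj2, hj3⟩
        exact ⟨j, hj1, by omega, hj3⟩

theorem pvSeq_items (n0 : Int) (m : Nat) : (pvSeq n0 m).items = pvFound n0 m := by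
  induction m with
  | zero => rfl
  | succ m ih =>
    by_cases h3 : 3 ≤ m
    · by_cases hf : ∀ j < m, 3 ≤ j → pvWin n0 j ≠ pvWin n0 m
      · have hc : (pvSeq n0 m).contains (pvWin n0 m) = false := by
          cases hcv : (pvSeq n0 m).contains (pvWin n0 m) with
          | false => rfl
          | true =>
            obtain ⟨j, hj1, hj2, hj3⟩ := (pvSeq_contains n0 m (pvWin n0 m)).mp hcv
            exact absurd hj3 (hf j hj2 hj1)
        simp only [pvSeq, if_pos h3, pvSd]
        rw [PySem.Dict.setdefault_of_not_contains _ _ hc,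
          PySem.Dict.items_insert_of_not_contains _ _ hc, ih]
        simp only [pvFound, if_pos (And.intro h3 hf)]
      · push Not at hf
        obtain ⟨j, hj1, hj2, hj3⟩ := hf
        have hc : (pvSeq n0 m).contains (pvWin n0 m) = true :=
          (pvSeq_contains n0 m (pvWin n0 m)).mpr ⟨j, hj2, hj1, hj3⟩
        simp only [pvSeq, if_pos h3, pvSd]
        rw [PySem.Dict.setdefault_of_contains _ _ hc, ih]
        have : ¬ (3 ≤ m ∧ ∀ j < m, 3 ≤ j → pvWin n0 j ≠ pvWin n0 m) := by
          rintro ⟨-, h⟩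
          exact h j hj1 hj2 hj3
        simp only [pvFound, if_neg this]
    · have : ¬ (3 ≤ m ∧ ∀ j < m, 3 ≤ j → pvWin n0 j ≠ pvWin n0 m) := by
        rintro ⟨h, -⟩
        exact h3 h
      simp only [pvSeq, if_neg h3, pvFound, if_neg this, ih]

theorem pvFound_keys (n0 : Int) (m : Nat) (p : List Int × Int) (hp : p ∈ pvFound n0 m) :
    ∃ j, 3 ≤ j ∧ j < m ∧ pvWin n0 j = p.1 := by
  induction m with
  | zero => simp [pvFound] at hp
  | succ m ih =>
    by_cases h : 3 ≤ m ∧ ∀ j < m, 3 ≤ j → pvWin n0 j ≠ pvWin n0 m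
    · rw [pvFound, if_pos h] at hp
      rcases List.mem_append.mp hp with hp | hp
      · obtain ⟨j, hj1, hj2, hj3⟩ := ih hp
        exact ⟨j, hj1, by omega, hj3⟩
      · simp only [List.mem_singleton] at hp
        subst hp
        exact ⟨m, h.1, by omega, rfl⟩
    · rw [pvFound, if_neg h] at hp
      obtain ⟨j, hj1, hj2, hj3⟩ := ih hp
      exact ⟨j, hj1, by omega, hj3⟩

theorem pvFound_nodup (n0 : Int) (m : Nat) : ((pvFound n0 m).map Prod.fst).Nodup := by
  induction m with
  | zero => simp [pvFound]
  | succ m ih =>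
    by_cases h : 3 ≤ m ∧ ∀ j < m, 3 ≤ j → pvWin n0 j ≠ pvWin n0 m
    · rw [pvFound, if_pos h, List.map_append, List.nodup_append]
      refine ⟨ih, List.nodup_singleton _, ?_⟩
      intro x hx y hy
      have hy2 : y = pvWin n0 m := by simpa using hy
      obtain ⟨p, hp, hpx⟩ := List.mem_map.mp hx
      obtain ⟨j, hj1, hj2, hj3⟩ := pvFound_keys n0 m p hp
      intro hxy
      exact h.2 j hj2 hj1 (by rw [hj3, hpx, hxy, hy2])
    · rw [pvFound, if_neg h]
      exact ih

-- ===== VERDICT (by name: the statement is the Claim_ definition above) =====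
theorem calculate_diffs_spec : Claim_equal_calculate_diffs := by
  intro n a _
  unfold Spec_calculate_diffs
  unfold calculate_diffs calculate_diffs_alt
  dsimp only
  have hr : PySem.List.pyRange 0 a 1 = PySem.List.pyRange 0 ((a.toNat : Int)) 1 := by
    rcases (by omega : 0 ≤ a ∨ a < 0) with h | h
    · rw [Int.toNat_of_nonneg h]
    · rw [PySem.List.pyRange_one_eq_nil (by omega), PySem.List.pyRange_one_eq_nil (by omega)]
  obtain ⟨S, hB, -⟩ := pvB_fold n a.toNat
  rw [hr, pvA_fold n a.toNat a.toNat le_rfl, hB]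
  dsimp only
  rw [pvSeq_items]
  congr 1
  have h := PySem.Dict.items_foldl_insert_fresh (d := PySem.Dict.empty)
    (l := pvFound n a.toNat) (k := Prod.fst) (v := Prod.snd)
    (fun p _ => by simp) (pvFound_nodup n a.toNat)
  simpa using h.symm
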